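-- pv_equiv track=rewrite | github.com/benrben/MPGA | mpga-plugin/cli/src/mpga/commands/develop_scheduler.py | _merge_file_groups
-- ===== SOURCE A (Python) =====
-- def _merge_file_groups(groups: list[list[str]]) -> list[list[str]]:
--     normalized = [sorted(set(group)) for group in groups if group]
--     merged: list[list[str]] = []
--
--     for group in normalized:
--         overlapping = [
--             existing
--             for existing in merged
--             if any(f in group for f in existing)
--         ]
--         if not overlapping:
--             merged.append(group)
--             continue
--
--         combined = sorted(set(
--             f for overlap in overlapping for f in overlap
--         ) | set(group))
--         for overlap in overlapping:
--             merged.remove(overlap)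
--         merged.append(combined)
--
--     return sorted(merged, key=lambda g: g[0] if g else "")
-- ===== SOURCE B (Python) =====
-- def _merge_file_groups(groups: list[list[str]]) -> list[list[str]]:
--     # file -> its current component (a sorted, deduplicated list, shared by all its files)
--     comp: dict[str, list[str]] = {}
--     for group in groups:
--         if not group:
--             continue
--         combined = set(group)
--         for f in group:
--             if f in comp:
--                 combined.update(comp[f])
--         component = sorted(combined)
--         for f in component:
--             comp[f] = component
--     distinct = {tuple(c) for c in comp.values()}
--     return sorted(list(t) for t in distinct)
-- ===== Notes on version B (the rewrite author's own statement) =====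
-- stated objective: alternative
-- what changed: A rescans the whole merged-components list for every group; B instead keeps a file-to-component dictionary, looks up each file of the group once, rewrites the merged component's entries, and finally sorts the distinct dictionary values.
import Mathlib
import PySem

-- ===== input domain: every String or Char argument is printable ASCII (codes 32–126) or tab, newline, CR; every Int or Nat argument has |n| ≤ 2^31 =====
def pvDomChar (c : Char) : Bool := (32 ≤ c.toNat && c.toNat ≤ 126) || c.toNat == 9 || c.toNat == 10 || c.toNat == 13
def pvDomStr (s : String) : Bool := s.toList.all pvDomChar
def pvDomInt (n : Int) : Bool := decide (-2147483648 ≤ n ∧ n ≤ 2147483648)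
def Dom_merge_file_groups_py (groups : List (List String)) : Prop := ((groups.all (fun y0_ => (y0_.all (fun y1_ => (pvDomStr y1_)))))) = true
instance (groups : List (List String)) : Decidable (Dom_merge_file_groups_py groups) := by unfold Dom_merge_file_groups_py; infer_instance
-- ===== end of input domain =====

-- B replaces A's per-group scan of the whole `merged` list by a file -> component
-- dictionary consulted once per file (an alternative one-pass algorithm); return values proved equal.


-- ===== PORT A =====
-- one iteration of A's `for group in normalized:` loop, acting on `merged`
def mergeStepA (merged : List (List String)) (group : List String) : List (List String) :=
  -- overlapping = [existing for existing in merged if any(f in group for f in existing)]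
  let overlapping := merged.filter (fun existing => existing.any (fun f => group.contains f))
  if overlapping = [] then merged ++ [group]
  else
    -- combined = sorted(set(f for overlap in overlapping for f in overlap) | set(group))
    -- (the set-union's hash iteration order is irrelevant: the result is sorted)
    let combined := PySem.List.sorted (PySem.Set.ofList (overlapping.flatMap id ++ group)) (fun x => x) false
    -- for overlap in overlapping: merged.remove(overlap)  -- each overlap occurs in merged, so
    -- list.remove never raises here; List.erase removes the first occurrence exactly as remove does
    let merged' := overlapping.foldl (fun acc ov => acc.erase ov) merged
    merged' ++ [combined]

def merge_file_groups_py (groups : List (List String)) : List (List String) :=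
  -- normalized = [sorted(set(group)) for group in groups if group]
  let normalized := (groups.filter (fun g => !(g.isEmpty))).map
    (fun g => PySem.List.sorted (PySem.Set.ofList g) (fun x => x) false)
  let merged := normalized.foldl mergeStepA []
  -- return sorted(merged, key=lambda g: g[0] if g else "")
  PySem.List.sorted merged (fun g => match g with | [] => "" | x :: _ => x) false

-- ===== PORT B =====
-- one iteration of B's `for group in groups:` loop, acting on the dict comp : file -> component
def mergeStepB (comp : PySem.Dict String (List String)) (group : List String) :
    PySem.Dict String (List String) :=
  if group.isEmpty then comp
  else
    -- combined = set(group); for f in group: if f in comp: combined.update(comp[f])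
    let combined := group.foldl
      (fun s f => match comp.get? f with
        | some c => PySem.Set.update s c
        | none => s)
      (PySem.Set.ofList group)
    -- component = sorted(combined)
    let component := PySem.List.sorted combined (fun x => x) false
    -- for f in component: comp[f] = component
    component.foldl (fun d f => d.insert f component) comp

def merge_file_groups_py_alt (groups : List (List String)) : List (List String) :=
  let comp := groups.foldl mergeStepB PySem.Dict.empty
  -- distinct = {tuple(c) for c in comp.values()}; return sorted(list(t) for t in distinct)
  -- (sorted with the injective identity key, so the set's iteration order is irrelevant)
  PySem.List.sorted (PySem.Set.ofList comp.values) (fun t => t) false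

-- ===== PRECONDITION & SPEC =====
def Spec_merge_file_groups_py (groups : List (List String)) (out : List (List String)) : Prop := out = merge_file_groups_py_alt groups
instance (groups : List (List String)) (out : List (List String)) : Decidable (Spec_merge_file_groups_py groups out) := by unfold Spec_merge_file_groups_py; infer_instance

-- ===== CLAIM (what is proved, stated in full; the proofs are below) =====
def Claim_equal_merge_file_groups_py : Prop := ∀ (groups : List (List String)), Dom_merge_file_groups_py groups → Spec_merge_file_groups_py groups (merge_file_groups_py groups)

-- ===== LEMMAS AND PROOFS =====

theorem get?_foldl_insert (l : List String) (v : List String)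
    (d : PySem.Dict String (List String)) (k : String) :
    (l.foldl (fun d f => d.insert f v) d).get? k =
      if k ∈ l then some v else d.get? k := by
  induction l generalizing d with
  | nil => simp
  | cons x t ih =>
    simp only [List.foldl_cons, ih, List.mem_cons]
    by_cases hk : k ∈ t
    · simp [hk]
    · by_cases hx : k = x
      · simp [hx, PySem.Dict.get?_insert_self]
      · simp [hk, hx, PySem.Dict.get?_insert_of_ne (hne := hx)]

theorem keys_nodup_foldl_insert (l : List String) (v : List String)
    (d : PySem.Dict String (List String)) (h : d.keys.Nodup) :
    (l.foldl (fun d f => d.insert f v) d).keys.Nodup := by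
  induction l generalizing d with
  | nil => simpa
  | cons x t ih => exact ih _ (PySem.Dict.nodup_keys_insert _ _ _ h)

theorem foldl_erase_of_not_mem (l : List (List String)) (acc : List (List String)) (c : List String)
    (h : ∀ x ∈ l, x ≠ c) :
    l.foldl (fun acc ov => acc.erase ov) (c :: acc) = c :: l.foldl (fun acc ov => acc.erase ov) acc := by
  induction l generalizing acc with
  | nil => rfl
  | cons x t ih =>
    simp only [List.foldl_cons]
    rw [List.erase_cons_tail (by simp [(h x (by simp)).symm])]
    exact ih _ (fun y hy => h y (by simp [hy]))

theorem erase_filter (M : List (List String)) (p : List String → Bool) (h : M.Nodup) :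
    (M.filter p).foldl (fun acc ov => acc.erase ov) M = M.filter (fun c => !(p c)) := by
  induction M with
  | nil => rfl
  | cons c t ih =>
    rcases List.nodup_cons.mp h with ⟨hc, ht⟩
    by_cases hp : p c
    · rw [List.filter_cons_of_pos hp, List.foldl_cons, List.erase_cons_head, ih ht,
        List.filter_cons_of_neg (by simp [hp])]
    · rw [List.filter_cons_of_neg hp,
        foldl_erase_of_not_mem _ _ _ (fun x hx => by
          intro hxc; exact hc (hxc ▸ (List.mem_filter.mp hx).1)),
        ih ht, List.filter_cons_of_pos (by simp [hp])]

theorem mem_combined_aux (d : PySem.Dict String (List String)) (l : List String)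
    (s : PySem.Set String) (f : String) :
    (f ∈ l.foldl
      (fun s g => match d.get? g with
        | some c => PySem.Set.update s c
        | none => s) s) ↔
      f ∈ s ∨ ∃ g' ∈ l, ∃ c, d.get? g' = some c ∧ f ∈ c := by
  induction l generalizing s with
  | nil => simp
  | cons x t ih =>
    simp only [List.foldl_cons, ih, List.mem_cons]
    cases hx : d.get? x with
    | none =>
      constructor
      · rintro (h | h)
        · exact Or.inl h
        · exact Or.inr (by rcases h with ⟨g', hg', hc⟩; exact ⟨g', Or.inr hg', hc⟩)
      · rintro (h | ⟨g', hg', c, hc, hf⟩)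
        · exact Or.inl h
        · rcases hg' with rfl | hg'
          · simp [hx] at hc
          · exact Or.inr ⟨g', hg', c, hc, hf⟩
    | some c0 =>
      simp only [PySem.Set.mem_update]
      constructor
      · rintro ((h | h) | h)
        · exact Or.inl h
        · exact Or.inr ⟨x, Or.inl rfl, c0, hx, h⟩
        · exact Or.inr (by rcases h with ⟨g', hg', hc⟩; exact ⟨g', Or.inr hg', hc⟩)
      · rintro (h | ⟨g', hg', c, hc, hf⟩)
        · exact Or.inl (Or.inl h)
        · rcases hg' with rfl | hg'
          · rw [hx] at hc; cases hc; exact Or.inl (Or.inr hf)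
          · exact Or.inr ⟨g', hg', c, hc, hf⟩

theorem nodup_combined_aux (d : PySem.Dict String (List String)) (l : List String)
    (s : PySem.Set String) (hs : s.Nodup) :
    (l.foldl
      (fun s g => match d.get? g with
        | some c => PySem.Set.update s c
        | none => s) s).Nodup := by
  induction l generalizing s with
  | nil => exact hs
  | cons x t ih =>
    simp only [List.foldl_cons]
    cases hx : d.get? x with
    | none => exact ih _ hs
    | some c0 => exact ih _ (PySem.Set.nodup_update _ _ hs)

structure MergeInv (M : List (List String)) (d : PySem.Dict String (List String)) : Prop where
  keys_nodup : d.keys.Nodup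
  lookup : ∀ f c, d.get? f = some c ↔ c ∈ M ∧ f ∈ c
  sorted : ∀ c ∈ M, c.Pairwise (· < ·)
  nonempty : ∀ c ∈ M, c ≠ []
  disj : M.Pairwise (fun c c' => ∀ f, f ∈ c → f ∉ c')

theorem nodupM {M d} (h : MergeInv M d) : M.Nodup := by
  refine List.Pairwise.imp_of_mem ?_ h.disj
  intro a b ha hb hd hab
  rcases List.exists_mem_of_ne_nil a (h.nonempty a ha) with ⟨f, hf⟩
  exact hd f hf (hab ▸ hf)

theorem sorted_set_ext (X Y : List String) (hX : X.Nodup) (hY : Y.Nodup)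
    (hm : ∀ f, f ∈ X ↔ f ∈ Y) :
    PySem.List.sorted X (fun x => x) false = PySem.List.sorted Y (fun x => x) false :=
  PySem.List.sorted_eq_sorted_of_perm X Y _ (fun _ _ h => h)
    ((List.perm_ext_iff_of_nodup hX hY).mpr hm)

theorem stepA_eq (M : List (List String)) (gN : List String) (hM : M.Nodup)
    (hgN : gN.Pairwise (· < ·)) :
    mergeStepA M gN =
      M.filter (fun c => !(c.any (fun f => gN.contains f))) ++
      [PySem.List.sorted
        (PySem.Set.ofList ((M.filter (fun c => c.any (fun f => gN.contains f))).flatMap id ++ gN))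
        (fun x => x) false] := by
  unfold mergeStepA
  set p : List String → Bool := fun c => c.any (fun f => gN.contains f) with hp
  by_cases hov : M.filter p = []
  · simp only [hov]
    have h1 : M.filter (fun c => !(p c)) = M :=
      List.filter_eq_self.mpr (fun c hc => by
        have := List.filter_eq_nil_iff.mp hov c hc
        simp_all)
    have h2 : PySem.Set.ofList gN = gN :=
      PySem.Set.ofList_eq_self_of_nodup gN (hgN.imp ne_of_lt)
    have h3 : PySem.List.sorted gN (fun x => x) false = gN :=
      PySem.List.sorted_eq_self_of_pairwise gN (fun x => x) (hgN.imp le_of_lt)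
    simp only [hp] at h1
    simp only [List.contains_eq_mem] at h1
    simp [h2, h3, h1]
  · simp only [if_neg hov]
    rw [erase_filter M p hM]

theorem pairwise_lt_canon (g : List String) :
    (PySem.List.sorted (PySem.Set.ofList g) (fun x => x) false).Pairwise (· < ·) :=
  PySem.List.sorted_ofList_pairwise_lt g

theorem mem_canon (g : List String) (f : String) :
    f ∈ PySem.List.sorted (PySem.Set.ofList g) (fun x => x) false ↔ f ∈ g := by
  rw [PySem.List.mem_sorted, PySem.Set.mem_ofList]

theorem inv_post (M : List (List String)) (d : PySem.Dict String (List String))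
    (hinv : MergeInv M d) (g gN C : List String)
    (hmemgN : ∀ f, f ∈ gN ↔ f ∈ g) (hgne : g ≠ [])
    (hCmem : ∀ f, f ∈ C ↔ f ∈ g ∨ ∃ c ∈ M, (∃ f' ∈ c, f' ∈ g) ∧ f ∈ c)
    (hClt : C.Pairwise (· < ·)) :
    MergeInv (M.filter (fun c => !(c.any (fun f => gN.contains f))) ++ [C])
             (C.foldl (fun d f => d.insert f C) d) := by
  have hany : ∀ c : List String, (c.any (fun f => gN.contains f)) = true ↔ ∃ f' ∈ c, f' ∈ g := by
    intro c; simp [List.any_eq_true, hmemgN]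
  have huniq : ∀ f a b, a ∈ M → f ∈ a → b ∈ M → f ∈ b → a = b := by
    intro f a b ha hfa hb hfb
    have h1 := (hinv.lookup f a).mpr ⟨ha, hfa⟩
    have h2 := (hinv.lookup f b).mpr ⟨hb, hfb⟩
    rw [h1] at h2; exact Option.some_inj.mp h2
  -- a member of an old non-overlapping component is never in C
  have hnotC : ∀ c f, c ∈ M → (c.any (fun f => gN.contains f)) = false → f ∈ c → f ∉ C := by
    intro c f hcM hnpb hfc hfC
    have hnp : ¬ ∃ f' ∈ c, f' ∈ g := fun hex => by rcases hex with ⟨f', hf'c, hf'g⟩; simp at hnpb; exact hnpb f' hf'c ((hmemgN f').mpr hf'g)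
    rcases (hCmem f).mp hfC with hfg | ⟨c', hc'M, hpc', hfc'⟩
    · exact hnp ⟨f, hfc, hfg⟩
    · exact hnp ((huniq f c c' hcM hfc hc'M hfc') ▸ hpc')
  constructor
  · exact keys_nodup_foldl_insert _ _ _ hinv.keys_nodup
  · intro f c
    rw [get?_foldl_insert]
    by_cases hfC : f ∈ C
    · simp only [if_pos hfC]
      constructor
      · rintro h; cases h
        exact ⟨by simp, hfC⟩
      · rintro ⟨hc, hfc⟩
        rcases List.mem_append.mp hc with hc | hc
        · rcases List.mem_filter.mp hc with ⟨hcM, hnp⟩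
          exact absurd hfC (hnotC c f hcM (by simpa using hnp) hfc)
        · simp_all
    · simp only [if_neg hfC]
      rw [hinv.lookup f c]
      constructor
      · rintro ⟨hcM, hfc⟩
        refine ⟨List.mem_append.mpr (Or.inl (List.mem_filter.mpr ⟨hcM, ?_⟩)), hfc⟩
        by_contra hnp
        simp only [Bool.not_eq_true', Bool.not_eq_false] at hnp
        exact hfC ((hCmem f).mpr (Or.inr ⟨c, hcM, (hany c).mp hnp, hfc⟩))
      · rintro ⟨hc, hfc⟩
        rcases List.mem_append.mp hc with hc | hc
        · exact ⟨(List.mem_filter.mp hc).1, hfc⟩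
        · simp only [List.mem_singleton] at hc
          exact absurd (hc ▸ hfc) hfC
  · intro c hc
    rcases List.mem_append.mp hc with hc | hc
    · exact hinv.sorted c (List.mem_filter.mp hc).1
    · exact (List.mem_singleton.mp hc) ▸ hClt
  · intro c hc
    rcases List.mem_append.mp hc with hc | hc
    · exact hinv.nonempty c (List.mem_filter.mp hc).1
    · rcases List.exists_mem_of_ne_nil g hgne with ⟨x, hx⟩
      have : x ∈ C := (hCmem x).mpr (Or.inl hx)
      rw [List.mem_singleton.mp hc]
      exact List.ne_nil_of_mem this
  · rw [List.pairwise_append]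
    refine ⟨hinv.disj.sublist (List.filter_sublist), List.pairwise_singleton _ _, ?_⟩
    intro a ha b hb f hfa
    rw [List.mem_singleton.mp hb]
    rcases List.mem_filter.mp ha with ⟨haM, hnp⟩
    exact hnotC a f haM (by simpa using hnp) hfa

theorem inv_step (M : List (List String)) (d : PySem.Dict String (List String))
    (g : List String) (hinv : MergeInv M d) :
    MergeInv (if g.isEmpty then M
      else mergeStepA M (PySem.List.sorted (PySem.Set.ofList g) (fun x => x) false))
      (mergeStepB d g) := by
  by_cases hg : g.isEmpty
  · simpa [mergeStepB, hg] using hinv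
  · simp only [mergeStepB, hg, Bool.false_eq_true, if_false]
    set gN := PySem.List.sorted (PySem.Set.ofList g) (fun x => x) false with hgNdef
    set p : List String → Bool := fun c => c.any (fun f => gN.contains f) with hpdef
    have hgne : g ≠ [] := by simpa [List.isEmpty_iff] using hg
    -- characterize p
    have hmemgN : ∀ f, f ∈ gN ↔ f ∈ g := by rw [hgNdef]; exact mem_canon g
    have hp : ∀ c, p c = true ↔ ∃ f ∈ c, f ∈ g := by
      intro c
      simp [hpdef, List.any_eq_true, hmemgN]
    -- the combined accumulator of B
    set comb := g.foldl
      (fun s f => match d.get? f with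
        | some c => PySem.Set.update s c
        | none => s)
      (PySem.Set.ofList g) with hcombdef
    have hcombmem : ∀ f, f ∈ comb ↔ f ∈ g ∨ ∃ c ∈ M, p c = true ∧ f ∈ c := by
      intro f
      rw [hcombdef, mem_combined_aux, PySem.Set.mem_ofList]
      constructor
      · rintro (h | ⟨g', hg', c, hc, hf⟩)
        · exact Or.inl h
        · rcases (hinv.lookup g' c).mp hc with ⟨hcM, hg'c⟩
          exact Or.inr ⟨c, hcM, (hp c).mpr ⟨g', hg'c, hg'⟩, hf⟩
      · rintro (h | ⟨c, hcM, hpc, hf⟩)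
        · exact Or.inl h
        · rcases (hp c).mp hpc with ⟨f', hf'c, hf'g⟩
          exact Or.inr ⟨f', hf'g, c, (hinv.lookup f' c).mpr ⟨hcM, hf'c⟩, hf⟩
    -- B's component equals A's combined C
    set C := PySem.List.sorted
      (PySem.Set.ofList ((M.filter p).flatMap id ++ gN)) (fun x => x) false with hCdef
    have hCmem : ∀ f, f ∈ C ↔ f ∈ g ∨ ∃ c ∈ M, p c = true ∧ f ∈ c := by
      intro f
      rw [hCdef, PySem.List.mem_sorted, PySem.Set.mem_ofList, List.mem_append, List.mem_flatMap]
      constructor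
      · rintro (⟨c, hc, hf⟩ | h)
        · rcases List.mem_filter.mp hc with ⟨hcM, hpc⟩
          exact Or.inr ⟨c, hcM, hpc, by simpa using hf⟩
        · exact Or.inl ((mem_canon g f).mp h)
      · rintro (h | ⟨c, hcM, hpc, hf⟩)
        · exact Or.inr ((mem_canon g f).mpr h)
        · exact Or.inl ⟨c, List.mem_filter.mpr ⟨hcM, hpc⟩, by simpa using hf⟩
    have hcomponent : PySem.List.sorted comb (fun x => x) false = C := by
      rw [hCdef]
      refine sorted_set_ext _ _ ?_ (PySem.Set.nodup_ofList _) ?_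
      · exact nodup_combined_aux d g _ (PySem.Set.nodup_ofList g)
      · intro f
        rw [hcombmem f, ← hCmem f, hCdef, PySem.List.mem_sorted]
    have hCmem' : ∀ f, f ∈ C ↔ f ∈ g ∨ ∃ c ∈ M, (∃ f' ∈ c, f' ∈ g) ∧ f ∈ c := by
      intro f
      rw [hCmem f]
      constructor
      · rintro (h | ⟨c, hcM, hpc, hf⟩)
        · exact Or.inl h
        · exact Or.inr ⟨c, hcM, (hp c).mp hpc, hf⟩
      · rintro (h | ⟨c, hcM, hpc, hf⟩)
        · exact Or.inl h
        · exact Or.inr ⟨c, hcM, (hp c).mpr hpc, hf⟩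
    have hClt : C.Pairwise (· < ·) := by
      rw [hCdef]; exact PySem.List.sorted_ofList_pairwise_lt _
    have hgNlt : gN.Pairwise (· < ·) := by rw [hgNdef]; exact pairwise_lt_canon g
    rw [hcomponent, stepA_eq M gN (nodupM hinv) hgNlt]
    exact inv_post M d hinv g gN C hmemgN hgne hCmem' hClt

theorem inv_empty : MergeInv [] PySem.Dict.empty := by
  constructor <;> simp [PySem.Dict.keys, PySem.Dict.get?, PySem.Dict.empty]

theorem inv_fold (groups : List (List String)) (M : List (List String))
    (d : PySem.Dict String (List String)) (hinv : MergeInv M d) :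
    MergeInv
      (((groups.filter (fun g => !(g.isEmpty))).map
        (fun g => PySem.List.sorted (PySem.Set.ofList g) (fun x => x) false)).foldl mergeStepA M)
      (groups.foldl mergeStepB d) := by
  induction groups generalizing M d with
  | nil => exact hinv
  | cons g t ih =>
    have hstep := inv_step M d g hinv
    by_cases hg : g.isEmpty
    · rw [List.filter_cons_of_neg (by simp [hg]), List.foldl_cons]
      exact ih M (mergeStepB d g) (by simpa [hg] using hstep)
    · rw [List.filter_cons_of_pos (by simp [hg]), List.map_cons, List.foldl_cons, List.foldl_cons]
      exact ih _ (mergeStepB d g) (by simpa [hg] using hstep)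

theorem final_eq (groups : List (List String)) :
    merge_file_groups_py groups = merge_file_groups_py_alt groups := by
  unfold merge_file_groups_py merge_file_groups_py_alt
  simp only []
  set M := (((groups.filter (fun g => !(g.isEmpty))).map
    (fun g => PySem.List.sorted (PySem.Set.ofList g) (fun x => x) false)).foldl mergeStepA []) with hM
  set d := groups.foldl mergeStepB PySem.Dict.empty with hd
  have hinv : MergeInv M d := inv_fold groups [] PySem.Dict.empty inv_empty
  have hMnodup := nodupM hinv
  have huniq : ∀ f a b, a ∈ M → f ∈ a → b ∈ M → f ∈ b → a = b := by
    intro f a b ha hfa hb hfb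
    have h1 := (hinv.lookup f a).mpr ⟨ha, hfa⟩
    have h2 := (hinv.lookup f b).mpr ⟨hb, hfb⟩
    rw [h1] at h2; exact Option.some_inj.mp h2
  have hvals : ∀ x, x ∈ PySem.Set.ofList d.values ↔ x ∈ M := by
    intro x
    rw [PySem.Set.mem_ofList]
    constructor
    · intro hx
      rcases List.mem_map.mp hx with ⟨pr, hpr, hsnd⟩
      rcases pr with ⟨k, v⟩
      cases hsnd
      exact ((hinv.lookup k v).mp (PySem.Dict.get?_of_mem_items d hpr hinv.keys_nodup)).1
    · intro hx
      rcases List.exists_mem_of_ne_nil x (hinv.nonempty x hx) with ⟨f, hf⟩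
      have := PySem.Dict.mem_items_of_get?_eq_some d ((hinv.lookup f x).mpr ⟨hx, hf⟩)
      exact List.mem_map.mpr ⟨(f, x), this, rfl⟩
  set ys := PySem.List.sorted M (fun g => match g with | [] => "" | x :: _ => x) false with hys
  have hysperm : ys.Perm M := PySem.List.sorted_perm _ _ _
  have hysnodup : ys.Nodup := hysperm.nodup_iff.mpr hMnodup
  have hysle : ys.Pairwise (fun a b =>
      (match a with | [] => "" | x :: _ => x) ≤ (match b with | [] => "" | x :: _ => x)) := by
    rw [hys]; exact PySem.List.sorted_pairwise _ _
  have hyslt : ys.Pairwise (· < ·) := by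
    refine List.Pairwise.imp_of_mem ?_ (hysle.and hysnodup)
    rintro a b ha hb ⟨hle, hne⟩
    have haM : a ∈ M := hysperm.mem_iff.mp ha
    have hbM : b ∈ M := hysperm.mem_iff.mp hb
    rcases List.exists_cons_of_ne_nil (hinv.nonempty a haM) with ⟨x, a', rfl⟩
    rcases List.exists_cons_of_ne_nil (hinv.nonempty b hbM) with ⟨y, b', rfl⟩
    simp only at hle
    have hxy : x ≠ y := by
      intro h
      exact hne (huniq x _ _ haM (by simp) hbM (by simp [h]))
    rw [List.cons_lt_cons_iff]
    exact Or.inl (lt_of_le_of_ne hle hxy)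
  have hperm : ys.Perm (PySem.Set.ofList d.values) :=
    hysperm.trans (((List.perm_ext_iff_of_nodup (PySem.Set.nodup_ofList _) hMnodup).mpr hvals).symm)
  have hbridge :
      (@PySem.List.sorted _ _ List.instLT (fun a b => a.decidableLT b)
        (PySem.Set.ofList d.values) (fun t => t) false)
      = (@PySem.List.sorted _ _ List.instLinearOrder.toLT LinearOrder.toDecidableLT
        (PySem.Set.ofList d.values) (fun t => t) false) := by
    rw [@PySem.List.sorted_eq_foldl_insertBy _ _ List.instLT (fun a b => a.decidableLT b),
        @PySem.List.sorted_eq_foldl_insertBy _ _ List.instLinearOrder.toLT LinearOrder.toDecidableLT]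
    apply PySem.List.foldl_congr_mem
    intro acc x _
    congr 1
    funext a b
    simp only [decide_eq_decide]
  rw [hbridge]
  exact (PySem.List.sorted_eq_of_perm_of_pairwise_lt _ ys _ hperm hyslt).symm

-- ===== VERDICT (by name: the statement is the Claim_ definition above) =====
theorem merge_file_groups_py_spec : Claim_equal_merge_file_groups_py := by
  intro groups _
  unfold Spec_merge_file_groups_py
  exact final_eq groups
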